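-- pv_equiv track=rewrite | github.com/SannyTusk16/College | strw.py | strw
-- ===== SOURCE A (Python) =====
-- def strw(s):
--     c=0
--     for i in s:
--         if(i==" "):
--             c+=1
--         elif(i=="."):
--             c+=1
--     return c
-- ===== SOURCE B (Python) =====
-- def strw(s):
--     return len(s) - len(s.replace(" ", "").replace(".", ""))
-- ===== Notes on version B (the rewrite author's own statement) =====
-- stated objective: idiomatic
-- what changed: Instead of a per-character branch loop with a counter, B deletes all spaces and dots via str.replace and returns the length difference; no loop or accumulator remains, and the work moves into C-level string primitives.
import Mathlib
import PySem

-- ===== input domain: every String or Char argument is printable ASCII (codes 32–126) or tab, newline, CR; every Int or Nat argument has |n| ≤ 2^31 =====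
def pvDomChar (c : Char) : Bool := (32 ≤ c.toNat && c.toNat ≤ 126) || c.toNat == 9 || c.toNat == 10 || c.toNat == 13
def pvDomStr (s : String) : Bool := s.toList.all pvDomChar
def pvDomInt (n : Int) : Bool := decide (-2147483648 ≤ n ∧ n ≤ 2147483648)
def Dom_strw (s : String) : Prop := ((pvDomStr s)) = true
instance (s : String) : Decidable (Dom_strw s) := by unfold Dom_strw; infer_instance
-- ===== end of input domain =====

-- B deletes spaces and dots with str.replace and returns the length difference (no loop/accumulator); idiomatic rewrite.

-- ===== PORT A =====
def strw (s : String) : Int :=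
  s.toList.foldl (fun c i => if i = ' ' then c + 1 else if i = '.' then c + 1 else c) 0

-- ===== PORT B =====
def strw_alt (s : String) : Int :=
  (PySem.Str.len s : Int) -
    (PySem.Str.len (PySem.Str.replace (PySem.Str.replace s " " "") "." "") : Int)

-- ===== PRECONDITION & SPEC =====
def Spec_strw (s : String) (out : Int) : Prop := out = strw_alt s
instance (s : String) (out : Int) : Decidable (Spec_strw s out) := by unfold Spec_strw; infer_instance

-- ===== CLAIM (what is proved, stated in full; the proofs are below) =====
def Claim_equal_strw : Prop := ∀ (s : String), Dom_strw s → Spec_strw s (strw s)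

-- ===== LEMMAS AND PROOFS =====
theorem replace_go_single_empty (x : Char) (l acc : List Char) (fuel : Nat)
    (h : l.length ≤ fuel) :
    PySem.Chars.replace.go [x] [] fuel l acc = acc.reverse ++ l.filter (· ≠ x) := by
  induction l generalizing fuel acc with
  | nil => cases fuel <;> simp [PySem.Chars.replace.go]
  | cons c t ih =>
    cases fuel with
    | zero => simp at h
    | succ n =>
      by_cases hc : c = x
      · subst hc
        rw [show PySem.Chars.replace.go [c] [] (n+1) (c :: t) acc
              = PySem.Chars.replace.go [c] [] n t acc from by
            simp [PySem.Chars.replace.go, List.isPrefixOf]]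
        rw [ih acc n (by simpa using h)]
        simp
      · rw [show PySem.Chars.replace.go [x] [] (n+1) (c :: t) acc
              = PySem.Chars.replace.go [x] [] n t (c :: acc) from by
            simp [PySem.Chars.replace.go, List.isPrefixOf, hc]
            intro hh; exact (hc hh.symm).elim]
        rw [ih (c :: acc) n (by simpa using Nat.le_of_succ_le_succ h)]
        simp [hc]

theorem replace_single_empty (x : Char) (l : List Char) :
    PySem.Chars.replace l [x] [] = l.filter (· ≠ x) := by
  rw [PySem.Chars.replace]
  simp only [List.isEmpty_cons, Bool.false_eq_true, if_false]
  simpa using replace_go_single_empty x l [] l.length le_rfl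

theorem strw_foldl_eq_counts (l : List Char) (c : Int) :
    l.foldl (fun c i => if i = ' ' then c + 1 else if i = '.' then c + 1 else c) c
      = c + l.count ' ' + l.count '.' := by
  induction l generalizing c with
  | nil => simp
  | cons x xs ih =>
    simp only [List.foldl_cons, List.count_cons, ih]
    by_cases h1 : x = ' ' <;> by_cases h2 : x = '.' <;> simp [h1, h2] <;> omega

theorem filter_filter_len (l : List Char) :
    ((l.filter (· ≠ ' ')).filter (· ≠ '.')).length + l.count ' ' + l.count '.'
      = l.length := by
  induction l with
  | nil => simp
  | cons x xs ih =>
    by_cases h1 : x = ' ' <;> by_cases h2 : x = '.' <;>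
      simp_all [List.filter_cons, List.count_cons] <;> omega

-- ===== VERDICT (by name: the statement is the Claim_ definition above) =====
theorem strw_spec : Claim_equal_strw := by
  intro s _
  unfold Spec_strw strw strw_alt
  have h1 : (PySem.Str.replace s " " "").toList = s.toList.filter (· ≠ ' ') := by
    rw [PySem.Str.toList_replace]
    exact replace_single_empty ' ' s.toList
  have h2 : (PySem.Str.replace (PySem.Str.replace s " " "") "." "").toList
      = (s.toList.filter (· ≠ ' ')).filter (· ≠ '.') := by
    rw [PySem.Str.toList_replace, ← h1]
    exact replace_single_empty '.' _
  rw [strw_foldl_eq_counts]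
  have hlen := filter_filter_len s.toList
  simp only [PySem.Str.len_eq]
  rw [h2]
  omega
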